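-- pv_equiv track=rewrite | github.com/jamezrin/audio-search-cli | audio_search.py | _char_to_word_indices
-- ===== SOURCE A (Python) =====
-- from typing import List, Dict, Optional, Tuple
--
-- def _char_to_word_indices(
--
--     word_texts: List[str],
--     start_char: int,
--     end_char: int
-- ) -> Tuple[Optional[int], Optional[int]]:
--     """Convert character positions to word indices"""
--     current_pos = 0
--     start_idx = None
--     end_idx = None
--
--     for i, word in enumerate(word_texts):
--         word_start = current_pos
--         word_end = current_pos + len(word)
--
--         # Check if this word overlaps with the match
--         if start_idx is None and start_char >= word_start and start_char < word_end + 1: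
--             start_idx = i
--
--         if end_char > word_start and end_char <= word_end + 1:
--             end_idx = i
--             break
--
--         current_pos = word_end + 1  # +1 for space
--
--     # If end_idx not found, it might be the last word
--     if start_idx is not None and end_idx is None:
--         end_idx = len(word_texts) - 1
--
--     return start_idx, end_idx
-- ===== SOURCE B (Python) =====
-- from itertools import accumulate
-- from bisect import bisect_left, bisect_right
--
-- def _char_to_word_indices(word_texts, start_char, end_char):
--     """Convert character positions to word indices via prefix offsets + bisect."""
--     # bounds[i] = char offset just past word i's slot (the word plus its trailing space)
--     bounds = list(accumulate(len(w) + 1 for w in word_texts))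
--     n = len(word_texts)
--     i = bisect_right(bounds, start_char)
--     start_idx = i if 0 <= start_char and i < n else None
--     j = bisect_left(bounds, end_char)
--     end_idx = j if 0 < end_char and j < n else None
--     if start_idx is not None and end_idx is None:
--         end_idx = n - 1
--     return start_idx, end_idx
-- ===== Notes on version B (the rewrite author's own statement) =====
-- stated objective: idiomatic
-- what changed: Replaces A's single stateful scan (running char position, coupled start/end checks, early break) with an itertools.accumulate prefix-boundary list and two independent bisect lookups (bisect_right for the start word, bisect_left for the end word), with the same final fixup.
-- intended difference: On degenerate spans where start_char lies at or past the slot boundary that end_char maps to (some word-slot boundary c satisfies end_char <= c <= start_char, with 0 < end_char and start_char still inside the text), A's early break at the end word stops the scan before the word containing start_char and it returns (None, end_idx); B returns (that word's index, end_idx), the intended value since start_char does lie inside a word. — e.g. on _char_to_word_indices(["ab", "cd"], 3, 3): A returns (none, some 0), B returns (some 1, some 0)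
import Mathlib
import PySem

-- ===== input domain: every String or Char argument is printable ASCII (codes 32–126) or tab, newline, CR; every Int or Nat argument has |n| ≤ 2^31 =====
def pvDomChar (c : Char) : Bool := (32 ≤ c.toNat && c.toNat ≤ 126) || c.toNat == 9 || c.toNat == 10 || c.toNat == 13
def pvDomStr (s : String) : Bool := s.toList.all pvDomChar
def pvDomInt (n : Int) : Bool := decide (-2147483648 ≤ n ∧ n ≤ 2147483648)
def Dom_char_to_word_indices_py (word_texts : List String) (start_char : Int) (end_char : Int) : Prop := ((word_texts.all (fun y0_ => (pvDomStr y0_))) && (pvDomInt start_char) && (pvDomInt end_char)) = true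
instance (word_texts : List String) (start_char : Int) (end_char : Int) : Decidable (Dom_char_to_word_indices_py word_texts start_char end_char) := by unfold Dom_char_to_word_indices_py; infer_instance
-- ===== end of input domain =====

-- B replaces A's single stateful scan (running position, early break) by a prefix-boundary
-- list plus two independent bisect lookups (idiomatic/alternative; no speed claim).

-- ===== PORT A =====
-- the for-loop of A: state = (current_pos, i, start_idx); returns (start_idx, end_idx) at break or loop end
def charToWordLoopA (s e : Int) : List String → Int → Int → Option Int → Option Int × Option Int
  | [], _, _, si => (si, none)
  | w :: ws, pos, i, si =>
    let wordStart := pos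
    let wordEnd := pos + PySem.Str.len w
    let si' := if si = none ∧ wordStart ≤ s ∧ s < wordEnd + 1 then some i else si
    if wordStart < e ∧ e ≤ wordEnd + 1 then (si', some i)
    else charToWordLoopA s e ws (wordEnd + 1) (i + 1) si'

def char_to_word_indices_py (word_texts : List String) (start_char : Int) (end_char : Int) : Option Int × Option Int :=
  let r := charToWordLoopA start_char end_char word_texts 0 0 none
  if r.1 ≠ none ∧ r.2 = none then (r.1, some ((word_texts.length : Int) - 1)) else r

-- ===== PORT B =====
-- bounds = list(accumulate(len(w) + 1 for w in word_texts))
def pvCum : List String → Int → List Int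
  | [], _ => []
  | w :: ws, acc => let acc' := acc + PySem.Str.len w + 1; acc' :: pvCum ws acc'

def char_to_word_indices_py_alt (word_texts : List String) (start_char : Int) (end_char : Int) : Option Int × Option Int :=
  let bounds := pvCum word_texts 0
  let n := word_texts.length
  let i := PySem.List.bisectRight bounds start_char
  let startIdx : Option Int := if 0 ≤ start_char ∧ i < n then some (i : Int) else none
  let j := PySem.List.bisectLeft bounds end_char
  let endIdx : Option Int := if 0 < end_char ∧ j < n then some (j : Int) else none
  let endIdx' := if startIdx ≠ none ∧ endIdx = none then some ((n : Int) - 1) else endIdx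
  (startIdx, endIdx')

-- ===== PRECONDITION & SPEC =====
-- On degenerate spans where start_char lies at or past the word-slot boundary that end_char maps to
-- (some boundary c has end_char ≤ c ≤ start_char, with 0 < end_char and start_char inside the text),
-- A's early break at the end word stops the scan before the word containing start_char and it returns
-- (None, end_idx); B returns (that word's index, end_idx), the intended value since start_char does
-- lie inside a word.
def pvBounds (ws : List String) : List Int :=
  (List.range ws.length).map (fun k => ((ws.take (k+1)).map (fun w => PySem.Str.len w + 1)).sum)

def D_char_to_word_indices_py (word_texts : List String) (start_char : Int) (end_char : Int) : Prop :=
  0 < end_char ∧ start_char < (word_texts.map (fun w => PySem.Str.len w + 1)).sum ∧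
    ∃ c ∈ pvBounds word_texts, end_char ≤ c ∧ c ≤ start_char
instance (word_texts : List String) (start_char : Int) (end_char : Int) : Decidable (D_char_to_word_indices_py word_texts start_char end_char) := by unfold D_char_to_word_indices_py; infer_instance

def Spec_char_to_word_indices_py (word_texts : List String) (start_char : Int) (end_char : Int) (out : Option Int × Option Int) : Prop := ¬ D_char_to_word_indices_py word_texts start_char end_char → out = char_to_word_indices_py_alt word_texts start_char end_char
instance (word_texts : List String) (start_char : Int) (end_char : Int) (out : Option Int × Option Int) : Decidable (Spec_char_to_word_indices_py word_texts start_char end_char out) := by unfold Spec_char_to_word_indices_py; infer_instance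

def pvDiffWitness_char_to_word_indices_py : List String × Int × Int := (["ab", "cd"], 3, 3)
def pvDiffWitnessOut_char_to_word_indices_py : (Option Int × Option Int) × (Option Int × Option Int) :=
  ((none, some 0), (some 1, some 0))

-- ===== CLAIM (what is proved, stated in full; the proofs are below) =====
def Claim_unchanged_char_to_word_indices_py : Prop := ∀ (word_texts : List String) (start_char : Int) (end_char : Int), Dom_char_to_word_indices_py word_texts start_char end_char → Spec_char_to_word_indices_py word_texts start_char end_char (char_to_word_indices_py word_texts start_char end_char)
def Claim_changed_char_to_word_indices_py : Prop := Dom_char_to_word_indices_py (pvDiffWitness_char_to_word_indices_py.1) (pvDiffWitness_char_to_word_indices_py.2.1) (pvDiffWitness_char_to_word_indices_py.2.2) ∧ D_char_to_word_indices_py (pvDiffWitness_char_to_word_indices_py.1) (pvDiffWitness_char_to_word_indices_py.2.1) (pvDiffWitness_char_to_word_indices_py.2.2) ∧ char_to_word_indices_py (pvDiffWitness_char_to_word_indices_py.1) (pvDiffWitness_char_to_word_indices_py.2.1) (pvDiffWitness_char_to_word_indices_py.2.2) = pvDiffWitnessOut_char_to_word_indices_py.1 ∧ char_to_word_indices_py_alt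 (pvDiffWitness_char_to_word_indices_py.1) (pvDiffWitness_char_to_word_indices_py.2.1) (pvDiffWitness_char_to_word_indices_py.2.2) = pvDiffWitnessOut_char_to_word_indices_py.2 ∧ pvDiffWitnessOut_char_to_word_indices_py.1 ≠ pvDiffWitnessOut_char_to_word_indices_py.2
def Claim_exact_char_to_word_indices_py : Prop := ∀ (word_texts : List String) (start_char : Int) (end_char : Int), Dom_char_to_word_indices_py word_texts start_char end_char → D_char_to_word_indices_py word_texts start_char end_char → char_to_word_indices_py word_texts start_char end_char ≠ char_to_word_indices_py_alt word_texts start_char end_char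

-- ===== LEMMAS AND PROOFS =====

-- length of the first prefix of l whose elements are < e (what bisect_left finds on a sorted list)
def jfun (e : Int) : List Int → Nat
  | [] => 0
  | c :: r => if c < e then jfun e r + 1 else 0

-- length of the first prefix of l whose elements are ≤ s (what bisect_right finds on a sorted list)
def kfun (s : Int) : List Int → Nat
  | [] => 0
  | c :: r => if c ≤ s then kfun s r + 1 else 0

theorem jfun_le_length (e : Int) (l : List Int) : jfun e l ≤ l.length := by
  induction l with
  | nil => simp [jfun]
  | cons c r ih => simp only [jfun, List.length_cons]; split <;> omega

theorem kfun_le_length (s : Int) (l : List Int) : kfun s l ≤ l.length := by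
  induction l with
  | nil => simp [kfun]
  | cons c r ih => simp only [kfun, List.length_cons]; split <;> omega

theorem jfun_lt (e : Int) (l : List Int) : ∀ p (hp : p < l.length), p < jfun e l → l[p] < e := by
  induction l with
  | nil => simp
  | cons c r ih =>
    intro p hp hpj
    simp only [jfun] at hpj
    by_cases hc : c < e
    · simp only [if_pos hc] at hpj
      cases p with
      | zero => simpa using hc
      | succ q => simpa using ih q (by simpa using hp) (by omega)
    · simp [if_neg hc] at hpj
theorem jfun_stop (e : Int) (l : List Int) (h : jfun e l < l.length) : ¬ l.getD (jfun e l) 0 < e := by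
  induction l with
  | nil => simp at h
  | cons c r ih =>
    by_cases hc : c < e
    · rw [show jfun e (c :: r) = jfun e r + 1 from by simp [jfun, hc]] at h ⊢
      rw [List.getD_cons_succ]
      exact ih (by simpa using h)
    · rw [show jfun e (c :: r) = 0 from by simp [jfun, hc]]
      simpa using hc

theorem kfun_lt (s : Int) (l : List Int) : ∀ p (hp : p < l.length), p < kfun s l → l[p] ≤ s := by
  induction l with
  | nil => simp
  | cons c r ih =>
    intro p hp hpj
    simp only [kfun] at hpj
    by_cases hc : c ≤ s
    · simp only [if_pos hc] at hpj
      cases p with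
      | zero => simpa using hc
      | succ q => simpa using ih q (by simpa using hp) (by omega)
    · simp [if_neg hc] at hpj
theorem kfun_stop (s : Int) (l : List Int) (h : kfun s l < l.length) : ¬ l.getD (kfun s l) 0 ≤ s := by
  induction l with
  | nil => simp at h
  | cons c r ih =>
    by_cases hc : c ≤ s
    · rw [show kfun s (c :: r) = kfun s r + 1 from by simp [kfun, hc]] at h ⊢
      rw [List.getD_cons_succ]
      exact ih (by simpa using h)
    · rw [show kfun s (c :: r) = 0 from by simp [kfun, hc]]
      simpa using hc

theorem jfun_zero_of_le (e : Int) (l : List Int) (h : ∀ x ∈ l, e ≤ x) : jfun e l = 0 := by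
  cases l with
  | nil => rfl
  | cons c r => simp only [jfun]; rw [if_neg]; have := h c (by simp); omega

theorem kfun_zero_of_lt (s : Int) (l : List Int) (h : ∀ x ∈ l, s < x) : kfun s l = 0 := by
  cases l with
  | nil => rfl
  | cons c r => simp only [kfun]; rw [if_neg]; have := h c (by simp); omega

theorem len_pvCum (ws : List String) (pos : Int) : (pvCum ws pos).length = ws.length := by
  induction ws generalizing pos with
  | nil => rfl
  | cons w ws ih => simp [pvCum, ih]

theorem strlen_nonneg (w : String) : 0 ≤ PySem.Str.len w := by
  rw [PySem.Str.len_eq]; positivity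

theorem mem_pvCum_gt (ws : List String) (pos : Int) : ∀ x ∈ pvCum ws pos, pos < x := by
  induction ws generalizing pos with
  | nil => simp [pvCum]
  | cons w ws ih =>
    intro x hx
    simp only [pvCum, List.mem_cons] at hx
    have hl := strlen_nonneg w
    rcases hx with h | h
    · omega
    · have := ih (pos + PySem.Str.len w + 1) x h; omega

theorem pairwise_pvCum (ws : List String) (pos : Int) : (pvCum ws pos).Pairwise (· ≤ ·) := by
  induction ws generalizing pos with
  | nil => simp [pvCum]
  | cons w ws ih =>
    simp only [pvCum]
    refine List.Pairwise.cons ?_ (ih _)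
    intro x hx
    have := mem_pvCum_gt ws (pos + PySem.Str.len w + 1) x hx
    omega

theorem bisectLeft_eq_jfun (l : List Int) (e : Int) (h : l.Pairwise (· ≤ ·)) :
    PySem.List.bisectLeft l e = jfun e l := by
  obtain ⟨hb1, hb2, hb3⟩ := PySem.List.bisectLeft_spec l e h
  set b := PySem.List.bisectLeft l e with hb
  have hj1 := jfun_le_length e l
  rcases lt_trichotomy b (jfun e l) with hlt | heq | hgt
  · have h1 := jfun_lt e l b (by omega) hlt
    have h2 := hb3 b (by omega) (le_refl _)
    omega
  · exact heq
  · have h1 := hb2 (jfun e l) (by omega) hgt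
    have h2 := jfun_stop e l (by omega)
    rw [List.getD_eq_getElem l 0 (by omega)] at h2
    omega

theorem bisectRight_eq_kfun (l : List Int) (s : Int) (h : l.Pairwise (· ≤ ·)) :
    PySem.List.bisectRight l s = kfun s l := by
  obtain ⟨hb1, hb2, hb3⟩ := PySem.List.bisectRight_spec l s h
  set b := PySem.List.bisectRight l s with hb
  have hj1 := kfun_le_length s l
  rcases lt_trichotomy b (kfun s l) with hlt | heq | hgt
  · have h1 := kfun_lt s l b (by omega) hlt
    have h2 := hb3 b (by omega) (le_refl _)
    omega
  · exact heq
  · have h1 := hb2 (kfun s l) (by omega) hgt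
    have h2 := kfun_stop s l (by omega)
    rw [List.getD_eq_getElem l 0 (by omega)] at h2
    omega

-- the A-loop with start already found: only the end search remains
theorem loopA_some (s e : Int) (ws : List String) (pos i v : Int) :
    charToWordLoopA s e ws pos i (some v) =
      (some v,
        if jfun e (pvCum ws pos) < ws.length ∧ (jfun e (pvCum ws pos) = 0 → pos < e)
        then some (i + (jfun e (pvCum ws pos) : Int)) else none) := by
  induction ws generalizing pos i with
  | nil => simp [charToWordLoopA, pvCum, jfun]
  | cons w ws ih =>
    simp only [charToWordLoopA, pvCum, jfun, List.length_cons]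
    have hl := strlen_nonneg w
    have hjz : e ≤ pos + PySem.Str.len w + 1 → jfun e (pvCum ws (pos + PySem.Str.len w + 1)) = 0 :=
      fun h => jfun_zero_of_le _ _ (fun x hx => by have := mem_pvCum_gt ws _ x hx; omega)
    rw [show (if some v = none ∧ pos ≤ s ∧ s < pos + PySem.Str.len w + 1 then some i else some v)
          = some v from if_neg (by simp)]
    by_cases hbr : pos < e ∧ e ≤ pos + PySem.Str.len w + 1
    · rw [if_pos hbr]
      split_ifs <;>
        first
          | rfl
          | (exfalso; omega)
          | (simp only [Prod.mk.injEq, Option.some.injEq, true_and]; omega)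
    · rw [if_neg hbr, ih]
      split_ifs <;>
        first
          | rfl
          | (exfalso; omega)
          | (simp only [Prod.mk.injEq, Option.some.injEq, true_and]; omega)

-- the A-loop from scratch, characterized by the two prefix searches over pvCum
theorem loopA_none (s e : Int) (ws : List String) (pos i : Int) :
    charToWordLoopA s e ws pos i none =
      (let cum := pvCum ws pos
       let n := ws.length
       let j := jfun e cum
       let k := kfun s cum
       let eb := j < n ∧ (j = 0 → pos < e)
       let sb := (if eb then k ≤ j else k < n) ∧ (k = 0 → pos ≤ s)
       ((if sb then some (i + (k : Int)) else none), (if eb then some (i + (j : Int)) else none))) := by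
  induction ws generalizing pos i with
  | nil => simp [charToWordLoopA, pvCum, jfun, kfun]
  | cons w ws ih =>
    simp only [charToWordLoopA, pvCum, jfun, kfun, List.length_cons, true_and]
    have hl := strlen_nonneg w
    have hjz : e ≤ pos + PySem.Str.len w + 1 → jfun e (pvCum ws (pos + PySem.Str.len w + 1)) = 0 :=
      fun h => jfun_zero_of_le _ _ (fun x hx => by have := mem_pvCum_gt ws _ x hx; omega)
    have hkz : s < pos + PySem.Str.len w + 1 → kfun s (pvCum ws (pos + PySem.Str.len w + 1)) = 0 :=
      fun h => kfun_zero_of_lt _ _ (fun x hx => by have := mem_pvCum_gt ws _ x hx; omega)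
    by_cases hbr : pos < e ∧ e ≤ pos + PySem.Str.len w + 1
    · rw [if_pos hbr]
      split_ifs <;>
        first
          | rfl
          | (exfalso; omega)
          | (simp only [Prod.mk.injEq, Option.some.injEq, true_and]; omega)
    · rw [if_neg hbr]
      by_cases hst : pos ≤ s ∧ s < pos + PySem.Str.len w + 1
      · rw [if_pos hst, loopA_some]
        split_ifs <;>
          first
            | rfl
            | (exfalso; omega)
            | (simp only [Prod.mk.injEq, Option.some.injEq, and_true]; omega)
      · rw [if_neg hst, ih]
        by_cases heb : jfun e (pvCum ws (pos + PySem.Str.len w + 1)) < ws.length ∧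
            (jfun e (pvCum ws (pos + PySem.Str.len w + 1)) = 0 → pos + PySem.Str.len w + 1 < e)
        · simp only [if_pos heb]
          split_ifs <;>
            first
              | rfl
              | (exfalso; omega)
              | (simp only [Prod.mk.injEq, Option.some.injEq, true_and]; omega)
        · simp only [if_neg heb]
          split_ifs <;>
            first
              | rfl
              | (exfalso; omega)
              | (simp only [Prod.mk.injEq, Option.some.injEq, and_true]; omega)

-- getElem form of pvCum
theorem pvCum_getElem (ws : List String) (pos : Int) :
    ∀ m (h : m < (pvCum ws pos).length),
      (pvCum ws pos)[m] = pos + ((ws.take (m+1)).map (fun w => PySem.Str.len w + 1)).sum := by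
  induction ws generalizing pos with
  | nil => simp [pvCum]
  | cons w ws ih =>
    intro m h
    cases m with
    | zero => simp [pvCum]; ring
    | succ q =>
      simp only [pvCum, List.getElem_cons_succ, List.take_succ_cons, List.map_cons, List.sum_cons]
      rw [ih (pos + PySem.Str.len w + 1) q (by simpa [pvCum] using h)]
      ring

-- D_'s boundary list is the pvCum list B builds
theorem pvBounds_eq (ws : List String) : pvBounds ws = pvCum ws 0 := by
  apply List.ext_getElem
  · simp [pvBounds, len_pvCum]
  · intro m h1 h2
    simp only [pvBounds, List.getElem_map, List.getElem_range]
    rw [pvCum_getElem ws 0 m h2]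
    ring

-- every element of pvCum is at most pos + total
theorem mem_pvCum_le (ws : List String) (pos : Int) :
    ∀ x ∈ pvCum ws pos, x ≤ pos + (ws.map (fun w => PySem.Str.len w + 1)).sum := by
  induction ws generalizing pos with
  | nil => simp [pvCum]
  | cons w ws ih =>
    intro x hx
    simp only [pvCum, List.mem_cons] at hx
    simp only [List.map_cons, List.sum_cons]
    rcases hx with h | h
    · have : (0:Int) ≤ (ws.map (fun w => PySem.Str.len w + 1)).sum := by
        apply List.sum_nonneg; intro y hy
        simp only [List.mem_map] at hy; obtain ⟨u, _, hu⟩ := hy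
        have := strlen_nonneg u; omega
      omega
    · have := ih (pos + PySem.Str.len w + 1) x h; omega

-- the last boundary (pos + total) is in pvCum for nonempty ws
theorem total_mem_pvCum (ws : List String) (pos : Int) (h : ws ≠ []) :
    pos + (ws.map (fun w => PySem.Str.len w + 1)).sum ∈ pvCum ws pos := by
  induction ws generalizing pos with
  | nil => exact absurd rfl h
  | cons w ws ih =>
    simp only [pvCum, List.map_cons, List.sum_cons, List.mem_cons]
    rcases eq_or_ne ws [] with h0 | h0
    · subst h0; left; simp; ring
    · right
      have h1 := ih (pos + PySem.Str.len w + 1) h0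
      have heq : pos + (PySem.Str.len w + 1 + (ws.map (fun w => PySem.Str.len w + 1)).sum)
          = pos + PySem.Str.len w + 1 + (ws.map (fun w => PySem.Str.len w + 1)).sum := by ring
      rw [heq]
      exact h1

theorem sorted_getElem_le (l : List Int) (h : l.Pairwise (· ≤ ·)) (p q : Nat)
    (hq : q < l.length) (hpq : p ≤ q) : l[p]'(by omega) ≤ l[q] := by
  rcases eq_or_lt_of_le hpq with rfl | hlt
  · exact le_refl _
  · exact (List.pairwise_iff_getElem.mp h) p q (by omega) hq hlt

-- kfun exceeds any index whose element is ≤ s (sorted list)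
theorem lt_kfun_of_le (s : Int) (l : List Int) (h : l.Pairwise (· ≤ ·)) (p : Nat)
    (hp : p < l.length) (hle : l[p] ≤ s) : p < kfun s l := by
  by_contra hc
  push_neg at hc
  have hk : kfun s l < l.length := by omega
  have := kfun_stop s l hk
  rw [List.getD_eq_getElem l 0 hk] at this
  exact this (le_trans (sorted_getElem_le l h (kfun s l) p hp hc) hle)

-- jfun is below any index whose element is ≥ e
theorem jfun_le_of_ge (e : Int) (l : List Int) (p : Nat) (hp : p < l.length)
    (hge : e ≤ l[p]) : jfun e l ≤ p := by
  by_contra hc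
  push_neg at hc
  have := jfun_lt e l p hp hc
  omega

theorem getD_lt_of_lt_jfun (e : Int) (l : List Int) (p : Nat) (hp : p < jfun e l) :
    l.getD p 0 < e := by
  have h1 := jfun_le_length e l
  have hpl : p < l.length := by omega
  rw [List.getD_eq_getElem l 0 hpl]
  exact jfun_lt e l p hpl hp

theorem getD_le_of_lt_kfun (s : Int) (l : List Int) (p : Nat) (hp : p < kfun s l) :
    l.getD p 0 ≤ s := by
  have h1 := kfun_le_length s l
  have hpl : p < l.length := by omega
  rw [List.getD_eq_getElem l 0 hpl]
  exact kfun_lt s l p hpl hp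

theorem ports_agree (ws : List String) (s e : Int)
    (hnd : ¬ D_char_to_word_indices_py ws s e) :
    char_to_word_indices_py ws s e = char_to_word_indices_py_alt ws s e := by
  unfold char_to_word_indices_py char_to_word_indices_py_alt D_char_to_word_indices_py at *
  rw [pvBounds_eq] at hnd
  rw [loopA_none]
  have hpw := pairwise_pvCum ws 0
  simp only [ne_eq]
  rw [bisectLeft_eq_jfun _ _ hpw, bisectRight_eq_kfun _ _ hpw]
  set cum := pvCum ws 0 with hcum
  set n := ws.length with hn
  set j := jfun e cum with hj
  set k := kfun s cum with hk
  have hlen : cum.length = n := len_pvCum ws 0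
  have hjn : j ≤ n := by rw [hj, ← hlen]; exact jfun_le_length e cum
  have hkn : k ≤ n := by rw [hk, ← hlen]; exact kfun_le_length s cum
  have hpos : ∀ x ∈ cum, 0 < x := mem_pvCum_gt ws 0
  have hsum : ∀ x ∈ cum, x ≤ 0 + (ws.map (fun w => PySem.Str.len w + 1)).sum := mem_pvCum_le ws 0
  have hE : (j < n ∧ (j = 0 → 0 < e)) ↔ (0 < e ∧ j < n) := by
    constructor
    · rintro ⟨h1, h2⟩
      refine ⟨?_, h1⟩
      rcases Nat.eq_zero_or_pos j with hz | hpz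
      · exact h2 hz
      · have hc := getD_lt_of_lt_jfun e cum 0 (by omega)
        have h0 : 0 < cum.length := by omega
        have := hpos (cum[0]) (List.getElem_mem h0)
        rw [List.getD_eq_getElem cum 0 h0] at hc
        omega
    · rintro ⟨h1, h2⟩; exact ⟨h2, fun _ => h1⟩
  have hS2 : (k = 0 → 0 ≤ s) ↔ 0 ≤ s := by
    constructor
    · intro h
      rcases Nat.eq_zero_or_pos k with hz | hpz
      · exact h hz
      · have hc := getD_le_of_lt_kfun s cum (k-1) (by omega)
        have h0 : k - 1 < cum.length := by omega
        have := hpos (cum[k-1]) (List.getElem_mem h0)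
        rw [List.getD_eq_getElem cum 0 h0] at hc
        omega
    · exact fun h _ => h
  have hKJ : (0 < e ∧ j < n) → 0 ≤ s → k < n → k ≤ j := by
    rintro ⟨he, hjlt⟩ hs hklt
    by_contra hkj
    push_neg at hkj
    apply hnd
    have hjc : j < cum.length := by omega
    refine ⟨he, ?_, cum[j], List.getElem_mem hjc, ?_, ?_⟩
    · have h1 := kfun_stop s cum (by omega)
      rw [← hk] at h1
      rw [List.getD_eq_getElem cum 0 (by omega)] at h1
      have h2 := hsum (cum[k]'(by omega)) (List.getElem_mem (by omega))
      omega
    · have h3 := jfun_stop e cum (by omega)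
      rw [← hj] at h3
      rw [List.getD_eq_getElem cum 0 hjc] at h3
      omega
    · have h1 : cum[j] ≤ cum[k-1]'(by omega) := sorted_getElem_le cum hpw j (k-1) (by omega) (by omega)
      have h2 := kfun_lt s cum (k-1) (by omega) (by omega)
      omega
  have heb' : (j < n ∧ (j = 0 → 0 < e)) = (0 < e ∧ j < n) := propext hE
  have hS2' : (k = 0 → 0 ≤ s) = (0 ≤ s) := propext hS2
  simp only [heb', hS2']
  by_cases heb : 0 < e ∧ j < n
  · simp only [if_pos heb]
    by_cases hsB : 0 ≤ s ∧ k < n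
    · have hkj := hKJ heb hsB.1 hsB.2
      simp only [if_pos (show k ≤ j ∧ 0 ≤ s from ⟨hkj, hsB.1⟩), if_pos hsB]
      simp
    · simp only [if_neg (show ¬ (k ≤ j ∧ 0 ≤ s) from fun hc => hsB ⟨hc.2, lt_of_le_of_lt hc.1 heb.2⟩),
                 if_neg hsB]
      simp
  · simp only [if_neg heb]
    by_cases hsB : 0 ≤ s ∧ k < n
    · simp only [if_pos (show k < n ∧ 0 ≤ s from ⟨hsB.2, hsB.1⟩), if_pos hsB]
      simp
    · simp only [if_neg (show ¬ (k < n ∧ 0 ≤ s) from fun hc => hsB ⟨hc.2, hc.1⟩), if_neg hsB]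
      simp

theorem ports_differ (ws : List String) (s e : Int)
    (hd : D_char_to_word_indices_py ws s e) :
    char_to_word_indices_py ws s e ≠ char_to_word_indices_py_alt ws s e := by
  unfold char_to_word_indices_py char_to_word_indices_py_alt D_char_to_word_indices_py at *
  rw [pvBounds_eq] at hd
  obtain ⟨he, hslt, c, hcmem, hec, hcs⟩ := hd
  rw [loopA_none]
  have hpw := pairwise_pvCum ws 0
  simp only [ne_eq]
  rw [bisectLeft_eq_jfun _ _ hpw, bisectRight_eq_kfun _ _ hpw]
  set cum := pvCum ws 0 with hcum
  set n := ws.length with hn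
  set j := jfun e cum with hj
  set k := kfun s cum with hk
  have hlen : cum.length = n := len_pvCum ws 0
  obtain ⟨m, hm, hmc⟩ := List.mem_iff_getElem.mp hcmem
  have hjm : j ≤ m := by rw [hj]; exact jfun_le_of_ge e cum m hm (by omega)
  have hmk : m < k := by rw [hk]; exact lt_kfun_of_le s cum hpw m hm (by omega)
  have hkn : k ≤ n := by rw [hk, ← hlen]; exact kfun_le_length s cum
  have hpos : ∀ x ∈ cum, 0 < x := mem_pvCum_gt ws 0
  have hs : 0 ≤ s := by have := hpos c hcmem; omega
  have hwsne : ws ≠ [] := by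
    intro hw
    rw [hcum, hw] at hcmem
    simp [pvCum] at hcmem
  have hklt : k < n := by
    rcases Nat.lt_or_ge k n with h1 | h1
    · exact h1
    · exfalso
      have htm := total_mem_pvCum ws 0 hwsne
      rw [← hcum] at htm
      obtain ⟨p, hp, hpc⟩ := List.mem_iff_getElem.mp htm
      have h2 := kfun_lt s cum p hp (by rw [← hk] at *; omega)
      simp only [zero_add] at hpc
      omega
  have heb : j < n ∧ (j = 0 → 0 < e) := ⟨by omega, fun _ => he⟩
  simp only [if_pos heb]
  simp only [if_neg (show ¬ (k ≤ j ∧ (k = 0 → 0 ≤ s)) from fun hc => absurd hc.1 (by omega)),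
             if_pos (show 0 ≤ s ∧ k < n from ⟨hs, hklt⟩),
             if_pos (show 0 < e ∧ j < n from ⟨he, by omega⟩)]
  simp

-- ===== VERDICT (by name: the statement is the Claim_ definition above) =====
theorem char_to_word_indices_py_spec : Claim_unchanged_char_to_word_indices_py := by
  intro ws s e _
  unfold Spec_char_to_word_indices_py
  intro hnd
  exact ports_agree ws s e hnd

theorem char_to_word_indices_py_changed : Claim_changed_char_to_word_indices_py := by
  unfold Claim_changed_char_to_word_indices_py; decide

theorem char_to_word_indices_py_tight : Claim_exact_char_to_word_indices_py := by
  intro ws s e _ hd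
  exact ports_differ ws s e hd
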